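-- pv_equiv track=rewrite | github.com/snowman12121212/Po_core | src/po_core/philosophers/levinas.py | _evaluate_responsibility
-- ===== SOURCE A (Python) =====
-- from typing import Any, Dict, List, Optional
--
-- def _evaluate_responsibility(text: str) -> Dict[str, Any]:
--     """
--     Evaluate responsibility for the Other.
--
--     Responsibility: Asymmetrical, infinite, not chosen
--     I am responsible before I am free
--     """
--     text_lower = text.lower()
--
--     # Responsibility indicators
--     responsibility_words = ["responsible", "responsibility", "accountable", "answer for"]
--     has_responsibility = sum(1 for phrase in responsibility_words if phrase in text_lower)
--
--     # For others indicators
--     for_others = ["for others", "for them", "for the other", "for everyone"]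
--     has_for_others = sum(1 for phrase in for_others if phrase in text_lower)
--
--     # Infinite/unlimited indicators
--     infinite_words = ["infinite", "unlimited", "endless", "boundless"]
--     has_infinite = sum(1 for word in infinite_words if word in text_lower)
--
--     # Choice/freedom indicators
--     choice_words = ["choose", "choice", "choose to", "decide to"]
--     has_choice = sum(1 for phrase in choice_words if phrase in text_lower)
--
--     # Before/prior indicators
--     prior_words = ["before", "prior to", "precedes", "first"]
--     has_prior = sum(1 for phrase in prior_words if phrase in text_lower)
--
--     # Reciprocity indicators
--     reciprocal_words = ["mutual", "reciprocal", "equal", "both"]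
--     has_reciprocal = sum(1 for word in reciprocal_words if word in text_lower)
--
--     if has_responsibility >= 1 and has_infinite >= 1:
--         level = "Infinite Responsibility"
--         description = "Infinite responsibility for the Other - unlimited and asymmetrical"
--         nature = "Levinasian"
--     elif has_responsibility >= 1 and has_for_others >= 1:
--         level = "Responsibility for Others"
--         description = "I am responsible for the Other - non-reciprocal obligation"
--         nature = "Ethical"
--     elif has_responsibility >= 1 and has_prior >= 1:
--         level = "Pre-Original Responsibility"
--         description = "Responsibility precedes freedom - assigned before I choose"
--         nature = "Anarchic"
--     elif has_reciprocal >= 1: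
--         level = "Reciprocal Responsibility"
--         description = "Mutual, equal responsibility - not Levinasian"
--         nature = "Symmetrical"
--     elif has_choice >= 1:
--         level = "Chosen Responsibility"
--         description = "Responsibility as a choice - contractual"
--         nature = "Voluntary"
--     else:
--         level = "No Responsibility Evident"
--         description = "Responsibility not clearly present"
--         nature = "None"
--
--     return {
--         "level": level,
--         "description": description,
--         "nature": nature,
--         "principle": "Infinite responsibility for the Other - asymmetrical and not chosen"
--     }
-- ===== SOURCE B (Python) =====
-- # Bitmask classifier: one pass over a flat keyword->bit table builds an integer
-- # mask; an ordered rule table of required masks is decoded by mask containment.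
-- _KEYWORD_BITS = [
--     ("responsible", 1), ("responsibility", 1), ("accountable", 1), ("answer for", 1),
--     ("for others", 2), ("for them", 2), ("for the other", 2), ("for everyone", 2),
--     ("infinite", 4), ("unlimited", 4), ("endless", 4), ("boundless", 4),
--     ("choose", 8), ("choice", 8), ("choose to", 8), ("decide to", 8),
--     ("before", 16), ("prior to", 16), ("precedes", 16), ("first", 16),
--     ("mutual", 32), ("reciprocal", 32), ("equal", 32), ("both", 32),
-- ]
--
-- _RULES = [
--     (1 | 4, "Infinite Responsibility",
--      "Infinite responsibility for the Other - unlimited and asymmetrical", "Levinasian"),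
--     (1 | 2, "Responsibility for Others",
--      "I am responsible for the Other - non-reciprocal obligation", "Ethical"),
--     (1 | 16, "Pre-Original Responsibility",
--      "Responsibility precedes freedom - assigned before I choose", "Anarchic"),
--     (32, "Reciprocal Responsibility",
--      "Mutual, equal responsibility - not Levinasian", "Symmetrical"),
--     (8, "Chosen Responsibility",
--      "Responsibility as a choice - contractual", "Voluntary"),
--     (0, "No Responsibility Evident",
--      "Responsibility not clearly present", "None"),  # req 0: always matches
-- ]
--
--
-- def _evaluate_responsibility(text: str):
--     t = text.lower()
--     mask = 0
--     for kw, bit in _KEYWORD_BITS: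
--         if kw in t:
--             mask |= bit
--     for req, level, description, nature in _RULES:
--         if mask & req == req:
--             break
--     return {
--         "level": level,
--         "description": description,
--         "nature": nature,
--         "principle": "Infinite responsibility for the Other - asymmetrical and not chosen",
--     }
-- ===== Notes on version B (the rewrite author's own statement) =====
-- stated objective: alternative
-- what changed: Replaced six per-category count variables and an if/elif chain by a single pass over a flat keyword-to-bit table accumulating an integer bitmask, decoded against an ordered table of required masks via mask & req == req with a req=0 default rule.
import Mathlib
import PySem

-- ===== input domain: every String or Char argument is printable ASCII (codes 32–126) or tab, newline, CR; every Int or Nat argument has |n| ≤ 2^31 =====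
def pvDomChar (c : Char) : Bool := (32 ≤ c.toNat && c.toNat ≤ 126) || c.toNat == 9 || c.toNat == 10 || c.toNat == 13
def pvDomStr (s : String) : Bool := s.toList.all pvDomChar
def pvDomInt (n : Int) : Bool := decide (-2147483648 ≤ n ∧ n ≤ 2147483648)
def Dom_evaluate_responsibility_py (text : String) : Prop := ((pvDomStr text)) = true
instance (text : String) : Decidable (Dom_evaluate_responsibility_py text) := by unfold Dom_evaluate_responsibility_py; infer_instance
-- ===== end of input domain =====

-- B replaces A's six count variables and if/elif chain by a keyword->bit table folded into a bitmask, decoded against a table of required masks (objective: alternative).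


-- ===== PORT A =====
-- sum(1 for phrase in ws if phrase in t)
def pvCountHits (ws : List String) (t : String) : Int :=
  (ws.map (fun p => if PySem.Str.isIn p t then (1 : Int) else 0)).sum

def evaluate_responsibility_py (text : String) : List (String × String) :=
  let text_lower := PySem.Str.lower text
  let has_responsibility := pvCountHits ["responsible", "responsibility", "accountable", "answer for"] text_lower
  let has_for_others := pvCountHits ["for others", "for them", "for the other", "for everyone"] text_lower
  let has_infinite := pvCountHits ["infinite", "unlimited", "endless", "boundless"] text_lower
  let has_choice := pvCountHits ["choose", "choice", "choose to", "decide to"] text_lower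
  let has_prior := pvCountHits ["before", "prior to", "precedes", "first"] text_lower
  let has_reciprocal := pvCountHits ["mutual", "reciprocal", "equal", "both"] text_lower
  let ldn : String × String × String :=
    if 1 ≤ has_responsibility ∧ 1 ≤ has_infinite then
      ("Infinite Responsibility", "Infinite responsibility for the Other - unlimited and asymmetrical", "Levinasian")
    else if 1 ≤ has_responsibility ∧ 1 ≤ has_for_others then
      ("Responsibility for Others", "I am responsible for the Other - non-reciprocal obligation", "Ethical")
    else if 1 ≤ has_responsibility ∧ 1 ≤ has_prior then
      ("Pre-Original Responsibility", "Responsibility precedes freedom - assigned before I choose", "Anarchic")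
    else if 1 ≤ has_reciprocal then
      ("Reciprocal Responsibility", "Mutual, equal responsibility - not Levinasian", "Symmetrical")
    else if 1 ≤ has_choice then
      ("Chosen Responsibility", "Responsibility as a choice - contractual", "Voluntary")
    else
      ("No Responsibility Evident", "Responsibility not clearly present", "None")
  [("level", ldn.1), ("description", ldn.2.1), ("nature", ldn.2.2),
   ("principle", "Infinite responsibility for the Other - asymmetrical and not chosen")]

-- ===== PORT B =====
def pvKeywordBits : List (String × Nat) :=
  [("responsible", 1), ("responsibility", 1), ("accountable", 1), ("answer for", 1),
   ("for others", 2), ("for them", 2), ("for the other", 2), ("for everyone", 2),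
   ("infinite", 4), ("unlimited", 4), ("endless", 4), ("boundless", 4),
   ("choose", 8), ("choice", 8), ("choose to", 8), ("decide to", 8),
   ("before", 16), ("prior to", 16), ("precedes", 16), ("first", 16),
   ("mutual", 32), ("reciprocal", 32), ("equal", 32), ("both", 32)]

def pvRules : List (Nat × String × String × String) :=
  [(5, "Infinite Responsibility", "Infinite responsibility for the Other - unlimited and asymmetrical", "Levinasian"),
   (3, "Responsibility for Others", "I am responsible for the Other - non-reciprocal obligation", "Ethical"),
   (17, "Pre-Original Responsibility", "Responsibility precedes freedom - assigned before I choose", "Anarchic"),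
   (32, "Reciprocal Responsibility", "Mutual, equal responsibility - not Levinasian", "Symmetrical"),
   (8, "Chosen Responsibility", "Responsibility as a choice - contractual", "Voluntary"),
   (0, "No Responsibility Evident", "Responsibility not clearly present", "None")]

def evaluate_responsibility_py_alt (text : String) : List (String × String) :=
  let t := PySem.Str.lower text
  let mask := pvKeywordBits.foldl (fun m kb => if PySem.Str.isIn kb.1 t then m ||| kb.2 else m) 0
  -- the for/break over pvRules: first rule with mask & req == req (the req=0 last rule always matches)
  let r := (pvRules.find? (fun r => mask &&& r.1 == r.1)).getD
             (0, "No Responsibility Evident", "Responsibility not clearly present", "None")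
  [("level", r.2.1), ("description", r.2.2.1), ("nature", r.2.2.2),
   ("principle", "Infinite responsibility for the Other - asymmetrical and not chosen")]

-- ===== PRECONDITION & SPEC =====
def Spec_evaluate_responsibility_py (text : String) (out : List (String × String)) : Prop := out = evaluate_responsibility_py_alt text
instance (text : String) (out : List (String × String)) : Decidable (Spec_evaluate_responsibility_py text out) := by unfold Spec_evaluate_responsibility_py; infer_instance

-- ===== CLAIM (what is proved, stated in full; the proofs are below) =====
def Claim_equal_evaluate_responsibility_py : Prop := ∀ (text : String), Dom_evaluate_responsibility_py text → Spec_evaluate_responsibility_py text (evaluate_responsibility_py text)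

-- ===== LEMMAS AND PROOFS =====

-- A's 0/1-count is ≥ 1 exactly when some keyword of the group occurs.
theorem pvCountHits_ge_one_iff (ws : List String) (t : String) :
    (1 ≤ pvCountHits ws t) ↔ ws.any (fun w => PySem.Str.isIn w t) = true := by
  induction ws with
  | nil => simp [pvCountHits]
  | cons w ws ih =>
    have hnn : 0 ≤ pvCountHits ws t := by
      unfold pvCountHits
      refine List.sum_nonneg ?_
      intro x hx
      simp only [List.mem_map] at hx
      obtain ⟨p, _, rfl⟩ := hx
      split <;> simp
    rw [show pvCountHits (w :: ws) t
          = (if PySem.Str.isIn w t then (1 : Int) else 0) + pvCountHits ws t from rfl]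
    by_cases hw : PySem.Str.isIn w t = true
    · simp only [hw, if_true, List.any_cons, Bool.true_or, iff_true]
      omega
    · have hf : PySem.Str.isIn w t = false := eq_false_of_ne_true hw
      simp only [hf, Bool.false_eq_true, if_false, zero_add, List.any_cons, Bool.false_or]
      exact ih

-- Folding one keyword group (all carrying the same bit) ORs that bit in iff some keyword occurs.
theorem pvFoldGroup (t : String) (ws : List String) (b m : Nat) :
    ((ws.map (fun w => (w, b))).foldl
        (fun m kb => if PySem.Str.isIn kb.1 t then m ||| kb.2 else m) m)
      = if ws.any (fun w => PySem.Str.isIn w t) then m ||| b else m := by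
  induction ws generalizing m with
  | nil => simp
  | cons w ws ih =>
    simp only [List.map_cons, List.foldl_cons, List.any_cons]
    by_cases hw : PySem.Str.isIn w t = true
    · rw [if_pos hw, ih]
      simp only [hw, Bool.true_or, if_true]
      split
      · rw [Nat.or_assoc, Nat.or_self]
      · rfl
    · rw [if_neg hw, ih]
      simp only [eq_false_of_ne_true hw, Bool.false_or]

-- The full bitmask as nested conditional ORs over the six group tests.
theorem pvMask_eq (t : String) :
    (pvKeywordBits.foldl (fun m kb => if PySem.Str.isIn kb.1 t then m ||| kb.2 else m) 0)
      = (let m1 := if (["responsible", "responsibility", "accountable", "answer for"] : List String).any (fun w => PySem.Str.isIn w t) then 0 ||| 1 else 0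
         let m2 := if (["for others", "for them", "for the other", "for everyone"] : List String).any (fun w => PySem.Str.isIn w t) then m1 ||| 2 else m1
         let m3 := if (["infinite", "unlimited", "endless", "boundless"] : List String).any (fun w => PySem.Str.isIn w t) then m2 ||| 4 else m2
         let m4 := if (["choose", "choice", "choose to", "decide to"] : List String).any (fun w => PySem.Str.isIn w t) then m3 ||| 8 else m3
         let m5 := if (["before", "prior to", "precedes", "first"] : List String).any (fun w => PySem.Str.isIn w t) then m4 ||| 16 else m4
         if (["mutual", "reciprocal", "equal", "both"] : List String).any (fun w => PySem.Str.isIn w t) then m5 ||| 32 else m5) := by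
  rw [show pvKeywordBits
        = ((["responsible", "responsibility", "accountable", "answer for"] : List String).map (fun w => (w, 1)))
          ++ ((["for others", "for them", "for the other", "for everyone"] : List String).map (fun w => (w, 2)))
          ++ ((["infinite", "unlimited", "endless", "boundless"] : List String).map (fun w => (w, 4)))
          ++ ((["choose", "choice", "choose to", "decide to"] : List String).map (fun w => (w, 8)))
          ++ ((["before", "prior to", "precedes", "first"] : List String).map (fun w => (w, 16)))
          ++ ((["mutual", "reciprocal", "equal", "both"] : List String).map (fun w => (w, 32))) from rfl]
  simp only [List.foldl_append, pvFoldGroup]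

theorem evaluate_responsibility_py_eq (text : String) :
    evaluate_responsibility_py text = evaluate_responsibility_py_alt text := by
  unfold evaluate_responsibility_py evaluate_responsibility_py_alt
  simp only [pvMask_eq, pvCountHits_ge_one_iff]
  generalize (["responsible", "responsibility", "accountable", "answer for"] : List String).any _ = b1
  generalize (["for others", "for them", "for the other", "for everyone"] : List String).any _ = b2
  generalize (["infinite", "unlimited", "endless", "boundless"] : List String).any _ = b3
  generalize (["choose", "choice", "choose to", "decide to"] : List String).any _ = b4
  generalize (["before", "prior to", "precedes", "first"] : List String).any _ = b5
  generalize (["mutual", "reciprocal", "equal", "both"] : List String).any _ = b6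
  cases b1 <;> cases b2 <;> cases b3 <;> cases b4 <;> cases b5 <;> cases b6 <;> rfl

-- ===== VERDICT (by name: the statement is the Claim_ definition above) =====
theorem evaluate_responsibility_py_spec : Claim_equal_evaluate_responsibility_py := by
  intro text _
  unfold Spec_evaluate_responsibility_py
  exact evaluate_responsibility_py_eq text
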